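-- pv_equiv track=rewrite | github.com/davidsvaughn/md2pdf | json_to_pdf_pipeline_alt.py | _first_lines_of_bulleted_lists
-- ===== SOURCE A (Python) =====
-- from typing import Any, Dict, List, Tuple
--
-- def _is_bullet_line(line: str) -> bool:
--     stripped = line.lstrip()
--     return stripped.startswith(("-", "*", "+")) and len(stripped) > 1 and stripped[1].isspace()
--
-- def _first_lines_of_bulleted_lists(md: str) -> List[str]:
--     lines = md.splitlines()
--     n = len(lines)
--     out: List[str] = []
--     i = 0
--
--     while i < n:
--         if _is_bullet_line(lines[i]):
--             prev_bullet = _is_bullet_line(lines[i - 1]) if i > 0 else False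
--             prev_blank = i == 0 or lines[i - 1].strip() == ""
--             if not prev_bullet or prev_blank:
--                 out.append(lines[i])
--                 j = i + 1
--                 while j < n and (_is_bullet_line(lines[j]) or lines[j].strip() == "" or lines[j].startswith(" ")):
--                     j += 1
--                 i = j
--                 continue
--         i += 1
--     return out
-- ===== SOURCE B (Python) =====
-- from typing import List
--
-- def _is_bullet_line(line: str) -> bool:
--     stripped = line.lstrip()
--     return stripped.startswith(("-", "*", "+")) and len(stripped) > 1 and stripped[1].isspace()
--
-- def _continues_block(line: str) -> bool:
--     return _is_bullet_line(line) or line.strip() == "" or line.startswith(" ")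
--
-- def _first_lines_of_bulleted_lists(md: str) -> List[str]:
--     # Single flat pass with an in_block flag instead of nested while-loops with index jumping.
--     out: List[str] = []
--     in_block = False
--     prev_bullet = False
--     for line in md.splitlines():
--         cur_bullet = _is_bullet_line(line)
--         if in_block and _continues_block(line):
--             prev_bullet = cur_bullet
--             continue
--         in_block = False
--         if cur_bullet and not prev_bullet:
--             out.append(line)
--             in_block = True
--         prev_bullet = cur_bullet
--     return out
-- ===== Notes on version B (the rewrite author's own statement) =====
-- stated objective: simpler
-- what changed: Replaced A's nested while-loops with index arithmetic and jumps (lines[i], lines[i-1], inner j-scan) by one flat for-loop over the lines carrying an in_block/prev_bullet state, and dropped the redundant prev_blank test (a bullet line never strips to empty).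
import Mathlib
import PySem

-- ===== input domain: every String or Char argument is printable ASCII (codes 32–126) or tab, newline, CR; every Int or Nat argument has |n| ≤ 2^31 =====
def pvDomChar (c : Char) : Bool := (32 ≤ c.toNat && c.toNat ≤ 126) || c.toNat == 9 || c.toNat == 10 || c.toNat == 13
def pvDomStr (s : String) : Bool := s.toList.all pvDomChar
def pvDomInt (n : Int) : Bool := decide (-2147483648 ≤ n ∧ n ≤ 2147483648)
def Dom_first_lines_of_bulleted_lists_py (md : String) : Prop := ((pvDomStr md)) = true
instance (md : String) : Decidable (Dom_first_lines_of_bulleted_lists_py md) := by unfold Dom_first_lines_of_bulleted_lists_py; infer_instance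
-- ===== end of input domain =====

-- B replaces A's nested while-loops with index jumping by one flat pass keeping an
-- in_block/prev_bullet state (objective: simpler single-pass decomposition; same O(n) cost).

-- shared helper of both Pythons: _is_bullet_line
def isBulletLine (line : String) : Bool :=
  let stripped := PySem.Str.lstrip line
  (PySem.Str.startswith stripped "-" || PySem.Str.startswith stripped "*" ||
      PySem.Str.startswith stripped "+")
    && decide (1 < PySem.Str.len stripped)
    && ((PySem.Str.pyGet? stripped 1).elim false PySem.Chars.isspace)

-- the continuation test '_is_bullet_line(l) or l.strip() == "" or l.startswith(" ")'
-- (inline in A's inner while; the helper _continues_block in B)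
def contLine (l : String) : Bool :=
  isBulletLine l || PySem.Str.strip l == "" || PySem.Str.startswith l " "

-- ===== PORT A =====
-- A's inner while: advance j while in range and the line continues the block
def skipA (lines : List String) (n j : Nat) : Nat :=
  if h : j < n ∧ contLine (lines.getD j "") = true then skipA lines n (j + 1) else j
termination_by n - j
decreasing_by omega

-- needed by loopA's termination proof (the port cites it by name)
theorem skipA_ge (lines : List String) (n j : Nat) : j ≤ skipA lines n j := by
  rw [skipA]
  split
  · exact Nat.le_trans (Nat.le_succ j) (skipA_ge lines n (j + 1))
  · exact Nat.le_refl j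
termination_by n - j
decreasing_by rename_i h; omega

-- A's outer while over the index i (all indices provably in range, read via getD)
def loopA (lines : List String) (n i : Nat) (out : List String) : List String :=
  if hi : i < n then
    if isBulletLine (lines.getD i "") then
      -- prev_bullet = (i > 0 and bullet lines[i-1]); prev_blank = (i == 0 or lines[i-1] strips empty)
      if !(if 0 < i then isBulletLine (lines.getD (i - 1) "") else false)
          || (decide (i = 0) || (PySem.Str.strip (lines.getD (i - 1) "") == "")) then
        loopA lines n (skipA lines n (i + 1)) (out ++ [lines.getD i ""])
      else loopA lines n (i + 1) out
    else loopA lines n (i + 1) out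
  else out
termination_by n - i
decreasing_by
  · have := skipA_ge lines n (i + 1); omega
  · omega
  · omega

def first_lines_of_bulleted_lists_py (md : String) : List String :=
  let lines := PySem.Str.splitlines md
  loopA lines lines.length 0 []

-- ===== PORT B =====
-- one step of B's flat for-loop; state = (out, in_block, prev_bullet)
def stepB (st : List String × Bool × Bool) (line : String) : List String × Bool × Bool :=
  let cur := isBulletLine line
  if st.2.1 && contLine line then (st.1, true, cur)
  else if cur && !st.2.2 then (st.1 ++ [line], true, cur)
  else (st.1, false, cur)

def first_lines_of_bulleted_lists_py_alt (md : String) : List String :=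
  ((PySem.Str.splitlines md).foldl stepB ([], false, false)).1

-- ===== PRECONDITION & SPEC =====
def Spec_first_lines_of_bulleted_lists_py (md : String) (out : List String) : Prop := out = first_lines_of_bulleted_lists_py_alt md
instance (md : String) (out : List String) : Decidable (Spec_first_lines_of_bulleted_lists_py md out) := by unfold Spec_first_lines_of_bulleted_lists_py; infer_instance

-- ===== CLAIM (what is proved, stated in full; the proofs are below) =====
def Claim_equal_first_lines_of_bulleted_lists_py : Prop := ∀ (md : String), Dom_first_lines_of_bulleted_lists_py md → Spec_first_lines_of_bulleted_lists_py md (first_lines_of_bulleted_lists_py md)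

-- ===== LEMMAS AND PROOFS =====

-- B's prev_bullet state just before processing line i
def pbAt (lines : List String) (i : Nat) : Bool :=
  if 0 < i then isBulletLine (lines.getD (i - 1) "") else false

-- a bullet line is never blank (its lstrip starts with a non-space marker char)
theorem bullet_not_blank (l : String) (h : isBulletLine l = true) :
    (PySem.Str.strip l == "") = false := by
  apply beq_false_of_ne
  simp only [isBulletLine, Bool.and_eq_true, Bool.or_eq_true] at h
  obtain ⟨⟨hpre, -⟩, -⟩ := h
  have hex : ∃ c t, PySem.Chars.lstrip l.toList = c :: t ∧ PySem.Chars.isspace c = false := by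
    rcases hpre with (h | h) | h <;>
    · rw [PySem.Str.startswith, PySem.Chars.startswith_iff] at h
      simp only [PySem.Str.toList_lstrip] at h
      obtain ⟨t, ht⟩ := h
      exact ⟨_, t, by simpa using ht.symm, by decide⟩
  obtain ⟨c, t, hct, hcsp⟩ := hex
  intro hcontra
  have : PySem.Chars.strip l.toList = [] := by
    have := congrArg String.toList hcontra
    simpa [PySem.Str.strip] using this
  rw [PySem.Chars.strip, PySem.Chars.rstrip, hct, List.reverse_eq_nil_iff,
    List.dropWhile_eq_nil_iff] at this
  exact absurd (this c (by simp)) (by simp [hcsp])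

-- cont = false forces cur = false
theorem not_cont_not_bullet (l : String) (h : contLine l = false) : isBulletLine l = false := by
  simp only [contLine, Bool.or_eq_false_iff] at h
  exact h.1.1

-- skip phase: folding B from an in-block state equals restarting the fold after A's inner while
theorem skip_fold (lines : List String) (n : Nat) (hn : n = lines.length) :
    ∀ m j out pb, n - j ≤ m →
      (List.foldl stepB (out, true, pb) (lines.drop j)).1
        = (List.foldl stepB (out, false, pbAt lines (skipA lines n j))
            (lines.drop (skipA lines n j))).1 := by
  intro m
  induction m with
  | zero =>
    intro j out pb hm
    rw [skipA]
    rw [dif_neg (by omega)]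
    rw [List.drop_eq_nil_of_le (by omega)]
    rfl
  | succ m ih =>
    intro j out pb hm
    by_cases hj : j < n
    · have hdrop : lines.drop j = lines[j]'(hn ▸ hj) :: lines.drop (j + 1) :=
        List.drop_eq_getElem_cons (hn ▸ hj)
      have hget : lines.getD j "" = lines[j]'(hn ▸ hj) := List.getD_eq_getElem lines "" (hn ▸ hj)
      by_cases hc : contLine (lines.getD j "") = true
      · rw [skipA, dif_pos ⟨hj, hc⟩]
        rw [hdrop, List.foldl_cons]
        have hcE : contLine (lines[j]'(hn ▸ hj)) = true := by rw [← hget]; exact hc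
        have hstep : stepB (out, true, pb) (lines[j]'(hn ▸ hj))
            = (out, true, isBulletLine (lines[j]'(hn ▸ hj))) := by
          simp [stepB, hcE]
        rw [hstep]
        exact ih (j + 1) out _ (by omega)
      · rw [skipA, dif_neg (by tauto)]
        have hcE : contLine (lines[j]'(hn ▸ hj)) = false := by
          rw [← hget]; simpa using hc
        have hcurE : isBulletLine (lines[j]'(hn ▸ hj)) = false :=
          not_cont_not_bullet _ hcE
        rw [hdrop, List.foldl_cons, List.foldl_cons]
        have h1 : stepB (out, true, pb) (lines[j]'(hn ▸ hj)) = (out, false, false) := by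
          simp [stepB, hcE, hcurE]
        have h2 : stepB (out, false, pbAt lines j) (lines[j]'(hn ▸ hj)) = (out, false, false) := by
          simp [stepB, hcurE]
        rw [h1, h2]
    · rw [skipA, dif_neg (by omega)]
      rw [List.drop_eq_nil_of_le (by omega)]
      rfl

-- main invariant: A's outer loop at index i equals B's fold over the remaining lines
-- from an out-of-block state whose prev_bullet reflects line i-1
theorem main_inv (lines : List String) (n : Nat) (hn : n = lines.length) :
    ∀ m i out, n - i ≤ m →
      loopA lines n i out = (List.foldl stepB (out, false, pbAt lines i) (lines.drop i)).1 := by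
  intro m
  induction m with
  | zero =>
    intro i out hm
    rw [loopA, dif_neg (by omega), List.drop_eq_nil_of_le (by omega)]
    rfl
  | succ m ih =>
    intro i out hm
    by_cases hi : i < n
    · have hil : i < lines.length := hn ▸ hi
      have hdrop : lines.drop i = lines[i] :: lines.drop (i + 1) := List.drop_eq_getElem_cons hil
      have hget : lines.getD i "" = lines[i] := List.getD_eq_getElem lines "" hil
      have hpb1 : pbAt lines (i + 1) = isBulletLine (lines[i]'hil) := by
        rw [pbAt, if_pos (Nat.succ_pos i)]
        simpa using congrArg isBulletLine hget
      rw [loopA, dif_pos hi]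
      by_cases hcur : isBulletLine (lines.getD i "") = true
      · have hcurE : isBulletLine (lines[i]'hil) = true := by rw [← hget]; exact hcur
        rw [if_pos hcur]
        by_cases hpb : pbAt lines i = true
        · -- previous line is a bullet: A advances by 1 (prev_blank is false); B's third branch
          have hi0 : 0 < i := by
            by_contra h0
            rw [pbAt, if_neg h0] at hpb
            simp at hpb
          have hprevb : isBulletLine (lines.getD (i - 1) "") = true := by
            rw [pbAt, if_pos hi0] at hpb; exact hpb
          have hblank : (PySem.Str.strip (lines.getD (i - 1) "") == "") = false :=
            bullet_not_blank _ hprevb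
          have hdec : decide (i = 0) = false := decide_eq_false (Nat.pos_iff_ne_zero.mp hi0)
          rw [if_pos hi0, hprevb, hdec, hblank, if_neg (by decide)]
          rw [hdrop, List.foldl_cons]
          have hstep : stepB (out, false, pbAt lines i) (lines[i]'hil)
              = (out, false, isBulletLine (lines[i]'hil)) := by
            simp [stepB, hpb]
          rw [hstep, ← hpb1]
          exact ih (i + 1) out (by omega)
        · -- fresh bullet: A appends and jumps over the block; B's second branch, then skip_fold
          have hpbf : pbAt lines i = false := Bool.eq_false_iff.mpr hpb
          have hcond : (!(if 0 < i then isBulletLine (lines.getD (i - 1) "") else false)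
              || (decide (i = 0) || (PySem.Str.strip (lines.getD (i - 1) "") == ""))) = true := by
            rw [show (if 0 < i then isBulletLine (lines.getD (i - 1) "") else false)
                = pbAt lines i from rfl, hpbf]
            simp
          rw [if_pos hcond]
          rw [hdrop, List.foldl_cons]
          have hstep : stepB (out, false, pbAt lines i) (lines[i]'hil)
              = (out ++ [lines[i]'hil], true, isBulletLine (lines[i]'hil)) := by
            simp [stepB, hpbf, hcurE]
          rw [hstep, ← hget]
          rw [skip_fold lines n hn m (i + 1) _ _ (by omega)]
          have hk := skipA_ge lines n (i + 1)
          exact ih (skipA lines n (i + 1)) (out ++ [lines.getD i ""]) (by omega)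
      · have hcurE : isBulletLine (lines[i]'hil) = false := by rw [← hget]; simpa using hcur
        rw [if_neg hcur]
        rw [hdrop, List.foldl_cons]
        have hstep : stepB (out, false, pbAt lines i) (lines[i]'hil)
            = (out, false, isBulletLine (lines[i]'hil)) := by
          simp [stepB, hcurE]
        rw [hstep, ← hpb1]
        exact ih (i + 1) out (by omega)
    · rw [loopA, dif_neg (by omega), List.drop_eq_nil_of_le (by omega)]
      rfl

-- ===== VERDICT (by name: the statement is the Claim_ definition above) =====
theorem first_lines_of_bulleted_lists_py_spec : Claim_equal_first_lines_of_bulleted_lists_py := by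
  intro md _
  unfold Spec_first_lines_of_bulleted_lists_py
  unfold first_lines_of_bulleted_lists_py first_lines_of_bulleted_lists_py_alt
  rw [main_inv (PySem.Str.splitlines md) (PySem.Str.splitlines md).length rfl
    (PySem.Str.splitlines md).length 0 [] (by omega)]
  simp [pbAt]
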